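-- pv_equiv track=rewrite | github.com/Kopytin-ivan/new | geom/templates.py | _booth_min_rotation
-- ===== SOURCE A (Python) =====
-- def _booth_min_rotation(seq):
--     """
--     Минимальная циклическая ротация за O(n) (алгоритм Бутта).
--     Работает для сравнимых элементов (кортежи (angle, percent)).
--     Возвращает индекс старта минимальной ротации.
--     """
--     s = seq + seq
--     n = len(seq)
--     i, j, k = 0, 1, 0
--     while i < n and j < n and k < n:
--         a = s[i+k]
--         b = s[j+k]
--         if a == b:
--             k += 1
--             continue
--         if a > b:
--             i = i + k + 1
--             if i <= j:
--                 i = j + 1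
--         else:
--             j = j + k + 1
--             if j <= i:
--                 j = i + 1
--         k = 0
--     start = min(i, j)
--     return start
-- ===== SOURCE B (Python) =====
-- def _booth_min_rotation(seq):
--     """Naive minimal cyclic rotation: compare all n rotations, keep the
--     lexicographically smallest (first index wins ties)."""
--     n = len(seq)
--     if n == 0:
--         return 0
--     best = 0
--     best_key = list(seq)
--     for i in range(1, n):
--         key = seq[i:] + seq[:i]
--         if key < best_key:
--             best = i
--             best_key = key
--     return best
-- ===== Notes on version B (the rewrite author's own statement) =====
-- stated objective: simpler
-- what changed: Replaced Booth's two-pointer O(n) scan over the doubled sequence with the naive search that builds each of the n rotations and keeps the lexicographically smallest one (strict < so the smallest start index wins ties).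
import Mathlib
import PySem

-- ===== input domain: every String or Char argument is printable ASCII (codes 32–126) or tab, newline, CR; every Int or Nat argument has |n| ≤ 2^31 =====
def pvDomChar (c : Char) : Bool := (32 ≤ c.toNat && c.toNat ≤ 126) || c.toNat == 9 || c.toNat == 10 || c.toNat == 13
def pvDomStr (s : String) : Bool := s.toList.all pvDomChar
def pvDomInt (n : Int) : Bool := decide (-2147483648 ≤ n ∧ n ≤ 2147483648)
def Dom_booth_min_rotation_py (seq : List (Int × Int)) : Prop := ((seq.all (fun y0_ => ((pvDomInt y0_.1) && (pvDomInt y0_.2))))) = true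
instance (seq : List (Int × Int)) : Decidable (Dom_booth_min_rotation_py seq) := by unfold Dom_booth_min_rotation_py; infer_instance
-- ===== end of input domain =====

-- B replaces Booth's O(n) two-pointer scan by the naive minimal-rotation search
-- (build each rotation, keep the lexicographically smallest); objective: simpler.

-- ===== PORT A =====

-- Python `a < b` on pairs (tuples compare lexicographically).
def pairLt (a b : Int × Int) : Bool := decide (a.1 < b.1 ∨ (a.1 = b.1 ∧ a.2 < b.2))

-- the while loop of A; state (i, j, k); s = seq+seq, n = len(seq).
-- s[i+k] / s[j+k] are always in range (i,j,k < n so the index is < 2n),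
-- so getD is exact here (Python never raises in this loop).
-- fuel only makes the recursion structural: each iteration strictly increases
-- i+j+k < 3n, so fuel 3n+1 is never exhausted (proved in loop_spec below).
def boothLoop (s : List (Int × Int)) (n : Nat) : Nat → Nat → Nat → Nat → Int
  | 0, i, j, _ => ((min i j : Nat) : Int)
  | fuel + 1, i, j, k =>
    if i < n ∧ j < n ∧ k < n then
      let a := s.getD (i + k) ((0 : Int), (0 : Int))
      let b := s.getD (j + k) ((0 : Int), (0 : Int))
      if a = b then
        boothLoop s n fuel i j (k + 1)
      else if pairLt b a then          -- Python: a > b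
        boothLoop s n fuel (if i + k + 1 ≤ j then j + 1 else i + k + 1) j 0
      else
        boothLoop s n fuel i (if j + k + 1 ≤ i then i + 1 else j + k + 1) 0
    else
      ((min i j : Nat) : Int)

def booth_min_rotation_py (seq : List (Int × Int)) : Int :=
  boothLoop (seq ++ seq) seq.length (3 * seq.length + 1) 0 1 0

-- ===== PORT B =====

-- Python `key < best_key` on lists of pairs (lexicographic, first difference wins).
def keyLt : List (Int × Int) → List (Int × Int) → Bool
  | [], [] => false
  | [], _ :: _ => true
  | _ :: _, [] => false
  | a :: as, b :: bs => pairLt a b || (decide (a = b) && keyLt as bs)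

-- seq[i:] + seq[:i]
def rotKey (seq : List (Int × Int)) (i : Nat) : List (Int × Int) :=
  seq.drop i ++ seq.take i

def booth_min_rotation_py_alt (seq : List (Int × Int)) : Int :=
  let n := seq.length
  if n = 0 then 0
  else
    let r := (List.range' 1 (n - 1)).foldl
      (fun (st : Nat × List (Int × Int)) i =>
        let key := rotKey seq i
        if keyLt key st.2 then (i, key) else st)
      (0, seq)
    (r.1 : Int)

-- ===== PRECONDITION & SPEC =====
def Spec_booth_min_rotation_py (seq : List (Int × Int)) (out : Int) : Prop := out = booth_min_rotation_py_alt seq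
instance (seq : List (Int × Int)) (out : Int) : Decidable (Spec_booth_min_rotation_py seq out) := by unfold Spec_booth_min_rotation_py; infer_instance

-- ===== CLAIM (what is proved, stated in full; the proofs are below) =====
def Claim_equal_booth_min_rotation_py : Prop := ∀ (seq : List (Int × Int)), Dom_booth_min_rotation_py seq → Spec_booth_min_rotation_py seq (booth_min_rotation_py seq)

-- ===== LEMMAS AND PROOFS =====

-- m is the least index (< n) of a lexicographically minimal rotation of seq.
def IsMinIdx (seq : List (Int × Int)) (m : Nat) : Prop :=
  m < seq.length ∧
  (∀ q < seq.length, keyLt (rotKey seq q) (rotKey seq m) = false) ∧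
  (∀ q < m, keyLt (rotKey seq m) (rotKey seq q) = true)

lemma pairLt_irrefl (a : Int × Int) : pairLt a a = false := by
  simp only [pairLt, decide_eq_false_iff_not]
  omega

lemma pairLt_trans {a b c : Int × Int} (h1 : pairLt a b = true) (h2 : pairLt b c = true) :
    pairLt a c = true := by
  simp only [pairLt, decide_eq_true_eq] at *
  rcases h1 with h | ⟨h, h'⟩ <;> rcases h2 with g | ⟨g, g'⟩ <;> omega

lemma pairLt_tri {a b : Int × Int} (hne : a ≠ b) (h : pairLt b a = false) : pairLt a b = true := by
  rcases a with ⟨a1, a2⟩; rcases b with ⟨b1, b2⟩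
  simp only [pairLt, decide_eq_false_iff_not] at h
  simp only [pairLt, decide_eq_true_eq]
  simp only [ne_eq, Prod.mk.injEq, not_and] at hne
  omega

lemma keyLt_irrefl (xs : List (Int × Int)) : keyLt xs xs = false := by
  induction xs with
  | nil => rfl
  | cons a as ih => simp [keyLt, pairLt_irrefl, ih]

lemma keyLt_trans : ∀ {xs ys zs : List (Int × Int)},
    keyLt xs ys = true → keyLt ys zs = true → keyLt xs zs = true := by
  intro xs
  induction xs with
  | nil =>
    intro ys zs h1 h2
    cases ys with
    | nil => exact h2
    | cons b bs =>
      cases zs with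
      | nil => simp [keyLt] at h2
      | cons c cs => rfl
  | cons a as ih =>
    intro ys zs h1 h2
    cases ys with
    | nil => simp [keyLt] at h1
    | cons b bs =>
      cases zs with
      | nil => simp [keyLt] at h2
      | cons c cs =>
        simp only [keyLt, Bool.or_eq_true, Bool.and_eq_true, decide_eq_true_eq] at *
        rcases h1 with h1 | ⟨rfl, h1⟩
        · rcases h2 with h2 | ⟨rfl, h2⟩
          · exact Or.inl (pairLt_trans h1 h2)
          · exact Or.inl h1
        · rcases h2 with h2 | ⟨rfl, h2⟩
          · exact Or.inl h2
          · exact Or.inr ⟨rfl, ih h1 h2⟩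

lemma keyLt_asymm {xs ys : List (Int × Int)} (h : keyLt xs ys = true) : keyLt ys xs = false := by
  cases hk : keyLt ys xs with
  | false => rfl
  | true =>
    have := keyLt_trans h hk
    rw [keyLt_irrefl] at this
    exact absurd this (by simp)

lemma keyLt_tri : ∀ {xs ys : List (Int × Int)}, xs.length = ys.length →
    keyLt xs ys = false → keyLt ys xs = false → xs = ys := by
  intro xs
  induction xs with
  | nil => intro ys hl _ _; cases ys with
    | nil => rfl
    | cons b bs => simp at hl
  | cons a as ih =>
    intro ys hl h1 h2
    cases ys with
    | nil => simp at hl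
    | cons b bs =>
      simp only [keyLt, Bool.or_eq_false_iff, Bool.and_eq_false_iff] at h1 h2
      have hab : a = b := by
        by_contra hne
        have := pairLt_tri hne h2.1
        rw [h1.1] at this; exact absurd this (by simp)
      subst hab
      have h1' : keyLt as bs = false := by
        rcases h1.2 with h | h
        · simp at h
        · exact h
      have h2' : keyLt bs as = false := by
        rcases h2.2 with h | h
        · simp at h
        · exact h
      have : as = bs := ih (by simpa using hl) h1' h2'
      rw [this]

lemma keyLt_total_of_ne {xs ys : List (Int × Int)} (hlen : xs.length = ys.length)
    (h1 : keyLt xs ys = false) (hne : xs ≠ ys) : keyLt ys xs = true := by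
  cases hx : keyLt ys xs with
  | true => rfl
  | false => exact absurd (keyLt_tri hlen h1 hx) hne

-- the default element used by getD throughout
def d0 : Int × Int := ((0 : Int), (0 : Int))

lemma keyLt_of_agree : ∀ (m : Nat) (xs ys : List (Int × Int)),
    xs.length = ys.length → m < xs.length →
    (∀ u < m, xs.getD u d0 = ys.getD u d0) →
    pairLt (xs.getD m d0) (ys.getD m d0) = true →
    keyLt xs ys = true := by
  intro m
  induction m with
  | zero =>
    intro xs ys hl hm hag hlt
    cases xs with
    | nil => simp at hm
    | cons a as =>
      cases ys with
      | nil => simp at hl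
      | cons b bs =>
        have hab : pairLt a b = true := by simpa [List.getD] using hlt
        simp [keyLt, hab]
  | succ m ih =>
    intro xs ys hl hm hag hlt
    cases xs with
    | nil => simp at hm
    | cons a as =>
      cases ys with
      | nil => simp at hl
      | cons b bs =>
        have hab : a = b := by
          have := hag 0 (Nat.succ_pos m); simpa [List.getD] using this
        subst hab
        have : keyLt as bs = true := by
          apply ih as bs (by simpa using hl) (by simpa using hm)
          · intro u hu
            have := hag (u + 1) (by omega)
            simpa [List.getD] using this
          · simpa [List.getD] using hlt
        simp [keyLt, this]

lemma rotKey_length (seq : List (Int × Int)) (q : Nat) (hq : q ≤ seq.length) :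
    (rotKey seq q).length = seq.length := by
  simp [rotKey]; omega

-- s = seq ++ seq: in-range wrap-around
lemma s_get_wrap (seq : List (Int × Int)) (y : Nat)
    (h1 : seq.length ≤ y) (h2 : y < 2 * seq.length) :
    (seq ++ seq).getD y d0 = (seq ++ seq).getD (y - seq.length) d0 := by
  rw [List.getD_append_right _ _ _ _ h1, List.getD_append _ _ _ _ (by omega)]

lemma rot_get (seq : List (Int × Int)) (q u : Nat)
    (hq : q < seq.length) (hu : u < seq.length) :
    (rotKey seq q).getD u d0 = (seq ++ seq).getD (q + u) d0 := by
  rcases Nat.lt_or_ge u (seq.length - q) with h | h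
  · rw [rotKey, List.getD_append _ _ _ _ (by simp; omega),
      List.getD_append _ _ _ _ (by omega)]
    simp only [List.getD_eq_getElem?_getD, List.getElem?_drop]
  · rw [rotKey, List.getD_append_right _ _ _ _ (by simp; omega),
      List.getD_append_right _ _ _ _ (by omega)]
    simp only [List.getD_eq_getElem?_getD, List.getElem?_take, List.length_drop]
    rw [if_pos (by omega)]
    congr 2
    omega

-- x may be in the second copy: rot (x % n) entry u is s[x+u]
lemma rot_get_mod (seq : List (Int × Int)) (x u : Nat)
    (hn : 0 < seq.length) (hx : x < 2 * seq.length) (hu : u < seq.length)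
    (hxu : x + u < 2 * seq.length) :
    (rotKey seq (x % seq.length)).getD u d0 = (seq ++ seq).getD (x + u) d0 := by
  rcases Nat.lt_or_ge x seq.length with h | h
  · rw [Nat.mod_eq_of_lt h]; exact rot_get seq x u h hu
  · have hmod : x % seq.length = x - seq.length := by
      rw [Nat.mod_eq_sub_mod h, Nat.mod_eq_of_lt (by omega)]
    rw [hmod, rot_get seq _ u (by omega) hu]
    have : x - seq.length + u = (x + u) - seq.length := by omega
    rw [this, ← s_get_wrap seq (x + u) (by omega) hxu]

-- ===== A-side loop invariant =====

def AInv (seq : List (Int × Int)) (ι : Nat) (i j k : Nat) : Prop :=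
  i ≠ j ∧ min i j < seq.length ∧
  (∀ t < k, (seq ++ seq).getD (i + t) d0 = (seq ++ seq).getD (j + t) d0) ∧
  (∀ p < max i j, p ≠ i → p ≠ j → p ≠ ι)

lemma inv_swap {seq ι i j k} (h : AInv seq ι i j k) : AInv seq ι j i k := by
  obtain ⟨h1, h2, h3, h4⟩ := h
  refine ⟨h1.symm, by omega, fun t ht => (h3 t ht).symm, fun p hp hpj hpi => h4 p (by omega) hpi hpj⟩

-- every raw index p ∈ [i, i+k] is not ι when s[i+k] > s[j+k] with matching prefixes
lemma beaten (seq : List (Int × Int)) (ι : Nat) (hι : IsMinIdx seq ι)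
    (i j k : Nat) (hi : i < seq.length) (hj : j < seq.length) (hk : k < seq.length)
    (hmatch : ∀ t < k, (seq ++ seq).getD (i + t) d0 = (seq ++ seq).getD (j + t) d0)
    (hlt : pairLt ((seq ++ seq).getD (j + k) d0) ((seq ++ seq).getD (i + k) d0) = true) :
    ∀ p, i ≤ p → p ≤ i + k → p ≠ ι := by
  intro p hpl hpr hpe
  set n := seq.length with hn
  have hn0 : 0 < n := by omega
  have hpn : p < n := by rw [hpe]; exact hι.1
  set t := p - i with ht
  have htk : t ≤ k := by omega
  set q := (j + t) % n with hq
  have hqn : q < n := Nat.mod_lt _ hn0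
  -- keyLt (rotKey seq q) (rotKey seq p) = true
  have hkey : keyLt (rotKey seq q) (rotKey seq p) = true := by
    apply keyLt_of_agree (k - t)
    · rw [rotKey_length seq q (by omega), rotKey_length seq p (by omega)]
    · rw [rotKey_length seq q (by omega)]; omega
    · intro u hu
      have h1 : (rotKey seq q).getD u d0 = (seq ++ seq).getD (j + t + u) d0 :=
        rot_get_mod seq (j + t) u hn0 (by omega) (by omega) (by omega)
      have h2 : (rotKey seq p).getD u d0 = (seq ++ seq).getD (i + t + u) d0 := by
        have := rot_get seq p u hpn (by omega)
        rw [this]; congr 1; omega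
      rw [h1, h2]
      have := hmatch (t + u) (by omega)
      rw [show i + t + u = i + (t + u) by omega, show j + t + u = j + (t + u) by omega]
      exact this.symm
    · have h1 : (rotKey seq q).getD (k - t) d0 = (seq ++ seq).getD (j + k) d0 := by
        have := rot_get_mod seq (j + t) (k - t) hn0 (by omega) (by omega) (by omega)
        rw [this]; congr 1; omega
      have h2 : (rotKey seq p).getD (k - t) d0 = (seq ++ seq).getD (i + k) d0 := by
        have := rot_get seq p (k - t) hpn (by omega)
        rw [this]; congr 1; omega
      rw [h1, h2]; exact hlt
  have := hι.2.1 q hqn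
  rw [hpe] at hkey
  rw [this] at hkey
  exact absurd hkey (by simp)

lemma inv_step (seq : List (Int × Int)) (ι : Nat) (hι : IsMinIdx seq ι)
    (i j k : Nat) (hi : i < seq.length) (hj : j < seq.length) (hk : k < seq.length)
    (hInv : AInv seq ι i j k)
    (hlt : pairLt ((seq ++ seq).getD (j + k) d0) ((seq ++ seq).getD (i + k) d0) = true) :
    AInv seq ι (if i + k + 1 ≤ j then j + 1 else i + k + 1) j 0 := by
  obtain ⟨h1, h2, h3, h4⟩ := hInv
  have hbeat := beaten seq ι hι i j k hi hj hk h3 hlt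
  split_ifs with hc
  · refine ⟨by omega, by omega, by omega, ?_⟩
    intro p hp hpi hpj
    rcases Nat.lt_or_ge p i with h | h
    · exact h4 p (by omega) (by omega) hpj
    · rcases Nat.lt_or_ge p (i + k + 1) with h' | h'
      · exact hbeat p h (by omega)
      · -- i+k+1 ≤ p < j+1, p ≠ j: p < j so p < max i j
        exact h4 p (by omega) (by omega) hpj
  · refine ⟨by omega, by omega, by omega, ?_⟩
    intro p hp hpi hpj
    rcases Nat.lt_or_ge p i with h | h
    · exact h4 p (by omega) (by omega) hpj
    · exact hbeat p h (by omega)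

-- match over a full period forces rotation equality / periodicity
lemma match_shift (seq : List (Int × Int)) (m M : Nat) (hm : m < M) (hM : M < seq.length)
    (hmatch : ∀ t < seq.length, (seq ++ seq).getD (m + t) d0 = (seq ++ seq).getD (M + t) d0) :
    ∀ x, m ≤ x → x + (M - m) < 2 * seq.length → (seq ++ seq).getD x d0 = (seq ++ seq).getD (x + (M - m)) d0 := by
  intro x hx hxd
  set n := seq.length with hn
  rcases Nat.lt_or_ge (x - m) n with h | h
  · have := hmatch (x - m) h
    rw [show m + (x - m) = x by omega] at this
    rw [show M + (x - m) = x + (M - m) by omega] at this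
    exact this
  · -- x ≥ n + m: go through the wrap
    have e1 : (seq ++ seq).getD x d0 = (seq ++ seq).getD (x - n) d0 :=
      s_get_wrap seq x (by omega) (by omega)
    have e2 : (seq ++ seq).getD (x - n) d0 = (seq ++ seq).getD (x - n + (M - m)) d0 := by
      have := hmatch (x - n - m) (by omega)
      rw [show m + (x - n - m) = x - n by omega] at this
      rw [show M + (x - n - m) = x - n + (M - m) by omega] at this
      exact this
    have e3 : (seq ++ seq).getD (x + (M - m)) d0 = (seq ++ seq).getD (x + (M - m) - n) d0 :=
      s_get_wrap seq _ (by omega) (by omega)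
    rw [e1, e2, e3]; congr 1; omega

lemma rotKey_ext (seq : List (Int × Int)) (p q : Nat) (hp : p < seq.length) (hq : q < seq.length)
    (h : ∀ u < seq.length, (rotKey seq p).getD u d0 = (rotKey seq q).getD u d0) :
    rotKey seq p = rotKey seq q := by
  apply List.ext_getElem
  · rw [rotKey_length seq p (by omega), rotKey_length seq q (by omega)]
  · intro u hu1 hu2
    have hu : u < seq.length := by
      rw [rotKey_length seq p (by omega)] at hu1; exact hu1
    have := h u hu
    rwa [List.getD_eq_getElem _ _ hu1, List.getD_eq_getElem _ _ hu2] at this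

lemma loop_exit_k (seq : List (Int × Int)) (ι : Nat) (hι : IsMinIdx seq ι)
    (i j k : Nat) (hi : i < seq.length) (hj : j < seq.length) (hk : seq.length ≤ k)
    (hInv : AInv seq ι i j k) : min i j = ι := by
  obtain ⟨h1, h2, h3, h4⟩ := hInv
  set n := seq.length with hn
  set m := min i j with hm
  set M := max i j with hM
  have hmM : m < M := by omega
  have hMn : M < n := by omega
  have hmatch : ∀ t < n, (seq ++ seq).getD (m + t) d0 = (seq ++ seq).getD (M + t) d0 := by
    intro t ht
    rcases Nat.le_total i j with h | h
    · have := h3 t (by omega)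
      rwa [show m = i by omega, show M = j by omega]
    · have := (h3 t (by omega)).symm
      rwa [show m = j by omega, show M = i by omega]
  have hιn : ι < n := hι.1
  by_contra hne
  rcases Nat.lt_or_ge ι M with hcase | hcase
  · -- ι < M: invariant leaves only i, j; and ι = M is impossible since rot m = rot M
    have hιm : ι ≠ m := fun h => hne (h ▸ rfl)
    have : ι = M := by
      by_contra hιM
      have : ι ≠ i ∧ ι ≠ j := by constructor <;> omega
      exact h4 ι hcase this.1 this.2 rfl
    subst this
    -- rot m = rot ι, m < ι contradicts leastness
    have heq : rotKey seq m = rotKey seq M := by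
      apply rotKey_ext seq m M (by omega) hMn
      intro u hu
      rw [rot_get seq m u (by omega) hu, rot_get seq M u hMn hu]
      exact hmatch u hu
    have := hι.2.2 m (by omega)
    rw [heq, keyLt_irrefl] at this
    exact absurd this (by simp)
  · -- ι ≥ M: rot (ι - d) = rot ι with ι - d < ι
    set d := M - m with hd
    have hd0 : 0 < d := by omega
    have heq : rotKey seq (ι - d) = rotKey seq ι := by
      apply rotKey_ext seq (ι - d) ι (by omega) hιn
      intro u hu
      rw [rot_get seq (ι - d) u (by omega) hu, rot_get seq ι u hιn hu]
      have := match_shift seq m M hmM hMn hmatch (ι - d + u) (by omega) (by omega)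
      rw [this]; congr 1; omega
    have := hι.2.2 (ι - d) (by omega)
    rw [← heq, keyLt_irrefl] at this
    exact absurd this (by simp)

lemma loop_exit (seq : List (Int × Int)) (ι : Nat) (hι : IsMinIdx seq ι)
    (i j k : Nat) (h : ¬(i < seq.length ∧ j < seq.length ∧ k < seq.length))
    (hInv : AInv seq ι i j k) : min i j = ι := by
  have h2 := hInv.2.1
  rcases Nat.lt_or_ge i seq.length with hi | hi
  · rcases Nat.lt_or_ge j seq.length with hj | hj
    · have hk : seq.length ≤ k := by
        by_contra hk
        exact h ⟨hi, hj, by omega⟩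
      exact loop_exit_k seq ι hι i j k hi hj hk hInv
    · obtain ⟨h1, h2', h3, h4⟩ := hInv
      have : ι = i := by
        by_contra hc
        have hιn := hι.1
        exact h4 ι (by omega) (fun h => hc h) (by omega) rfl
      omega
  · obtain ⟨h1, h2', h3, h4⟩ := hInv
    have : ι = j := by
      by_contra hc
      have hιn := hι.1
      exact h4 ι (by omega) (by omega) (fun h => hc h) rfl
    omega

lemma loop_spec (seq : List (Int × Int)) (ι : Nat) (hι : IsMinIdx seq ι) :
    ∀ fuel i j k, 3 * seq.length < fuel + (i + j + k) → AInv seq ι i j k →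
      boothLoop (seq ++ seq) seq.length fuel i j k = (ι : Int) := by
  intro fuel
  induction fuel with
  | zero =>
    intro i j k hf hInv
    have hg : ¬(i < seq.length ∧ j < seq.length ∧ k < seq.length) := by omega
    rw [boothLoop, loop_exit seq ι hι i j k hg hInv]
  | succ fuel ih =>
    intro i j k hf hInv
    simp only [boothLoop]
    by_cases hg : i < seq.length ∧ j < seq.length ∧ k < seq.length
    case neg => rw [if_neg hg, loop_exit seq ι hι i j k hg hInv]
    rw [if_pos hg]
    by_cases heq : (seq ++ seq).getD (i + k) ((0 : Int), (0 : Int))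
        = (seq ++ seq).getD (j + k) ((0 : Int), (0 : Int))
    · rw [if_pos heq]
      apply ih i j (k + 1) (by omega)
      obtain ⟨h1, h2, h3, h4⟩ := hInv
      refine ⟨h1, h2, ?_, h4⟩
      intro t ht
      rcases Nat.lt_or_ge t k with h' | h'
      · exact h3 t h'
      · have : t = k := by omega
        subst this; exact heq
    · rw [if_neg heq]
      by_cases hgt : pairLt ((seq ++ seq).getD (j + k) ((0 : Int), (0 : Int)))
          ((seq ++ seq).getD (i + k) ((0 : Int), (0 : Int))) = true
      · rw [if_pos hgt]
        exact ih _ j 0 (by split_ifs <;> omega)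
          (inv_step seq ι hι i j k hg.1 hg.2.1 hg.2.2 hInv hgt)
      · rw [if_neg hgt]
        apply ih i _ 0 (by split_ifs <;> omega)
        have hlt : pairLt ((seq ++ seq).getD (i + k) d0) ((seq ++ seq).getD (j + k) d0) = true := by
          apply pairLt_tri _ (by simpa using hgt)
          intro hc
          exact heq (by simpa [d0] using hc)
        exact inv_swap (inv_step seq ι hι j i k hg.2.1 hg.1 hg.2.2 (inv_swap hInv) (by simpa [d0] using hlt))

-- ===== B-side: the fold computes the least argmin =====

lemma rotKey_zero (seq : List (Int × Int)) : rotKey seq 0 = seq := by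
  simp [rotKey]

lemma fold_spec (seq : List (Int × Int)) (hn : 0 < seq.length) :
    ∀ m, m < seq.length →
      (((List.range' 1 m).foldl
        (fun (st : Nat × List (Int × Int)) i =>
          if keyLt (rotKey seq i) st.2 then (i, rotKey seq i) else st)
        (0, seq)).2 = rotKey seq (((List.range' 1 m).foldl
        (fun (st : Nat × List (Int × Int)) i =>
          if keyLt (rotKey seq i) st.2 then (i, rotKey seq i) else st)
        (0, seq)).1)) ∧
      (((List.range' 1 m).foldl
        (fun (st : Nat × List (Int × Int)) i =>
          if keyLt (rotKey seq i) st.2 then (i, rotKey seq i) else st)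
        (0, seq)).1 ≤ m) ∧
      (∀ q ≤ m, keyLt (rotKey seq q) (rotKey seq (((List.range' 1 m).foldl
        (fun (st : Nat × List (Int × Int)) i =>
          if keyLt (rotKey seq i) st.2 then (i, rotKey seq i) else st)
        (0, seq)).1)) = false) ∧
      (∀ q < ((List.range' 1 m).foldl
        (fun (st : Nat × List (Int × Int)) i =>
          if keyLt (rotKey seq i) st.2 then (i, rotKey seq i) else st)
        (0, seq)).1, keyLt (rotKey seq (((List.range' 1 m).foldl
        (fun (st : Nat × List (Int × Int)) i =>
          if keyLt (rotKey seq i) st.2 then (i, rotKey seq i) else st)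
        (0, seq)).1)) (rotKey seq q) = true) := by
  intro m
  induction m with
  | zero =>
    intro _
    simp only [List.range'_zero, List.foldl_nil]
    refine ⟨(rotKey_zero seq).symm, le_refl 0, ?_, by omega⟩
    intro q hq
    have : q = 0 := by omega
    subst this
    exact keyLt_irrefl _
  | succ m ih =>
    intro hm
    obtain ⟨ih1, ih2, ih3, ih4⟩ := ih (by omega)
    rw [List.range'_1_concat, List.foldl_append]
    set st := (List.range' 1 m).foldl
        (fun (st : Nat × List (Int × Int)) i =>
          if keyLt (rotKey seq i) st.2 then (i, rotKey seq i) else st)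
        (0, seq) with hst
    simp only [List.foldl_cons, List.foldl_nil]
    rw [show 1 + m = m + 1 from by omega]
    rw [ih1]
    have hstm : st.1 < seq.length := by omega
    have hlen : ∀ q, q < seq.length → (rotKey seq q).length = (rotKey seq st.1).length := by
      intro q hq
      rw [rotKey_length seq q (by omega), rotKey_length seq st.1 (by omega)]
    split_ifs with hc
    · refine ⟨rfl, by omega, ?_, ?_⟩
      · intro q hq
        rcases Nat.lt_or_ge q (m + 1) with h | h
        · apply keyLt_asymm
          have h3 := ih3 q (by omega)
          by_cases heq : rotKey seq q = rotKey seq st.1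
          · rw [← heq] at hc; exact hc
          · exact keyLt_trans hc (keyLt_total_of_ne (hlen q (by omega)) h3 heq)
        · have : q = m + 1 := by omega
          subst this; exact keyLt_irrefl _
      · intro q hq
        rcases Nat.lt_or_ge q st.1 with h | h
        · exact keyLt_trans hc (ih4 q h)
        · have h3 := ih3 q (by omega)
          by_cases heq : rotKey seq q = rotKey seq st.1
          · rw [heq]; exact hc
          · exact keyLt_trans hc (keyLt_total_of_ne (hlen q (by omega)) h3 heq)
    · refine ⟨ih1, by omega, ?_, ih4⟩
      intro q hq
      rcases Nat.lt_or_ge q (m + 1) with h | h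
      · exact ih3 q (by omega)
      · have : q = m + 1 := by omega
        subst this
        revert hc; cases keyLt (rotKey seq (m + 1)) (rotKey seq st.1) <;> simp

lemma alt_isMinIdx (seq : List (Int × Int)) (hn : 0 < seq.length) :
    ∃ m : Nat, IsMinIdx seq m ∧ booth_min_rotation_py_alt seq = (m : Int) := by
  obtain ⟨h1, h2, h3, h4⟩ := fold_spec seq hn (seq.length - 1) (by omega)
  set st := (List.range' 1 (seq.length - 1)).foldl
      (fun (st : Nat × List (Int × Int)) i =>
        if keyLt (rotKey seq i) st.2 then (i, rotKey seq i) else st)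
      (0, seq) with hst
  refine ⟨st.1, ⟨by omega, ?_, h4⟩, ?_⟩
  · intro q hq
    exact h3 q (by omega)
  · rw [booth_min_rotation_py_alt]
    simp only [if_neg (by omega : ¬ seq.length = 0)]
    congr 1

-- ===== VERDICT (by name: the statement is the Claim_ definition above) =====
theorem booth_min_rotation_py_spec : Claim_equal_booth_min_rotation_py := by
  intro seq _
  unfold Spec_booth_min_rotation_py
  rcases Nat.eq_zero_or_pos seq.length with h0 | hn
  · -- empty: A's loop exits immediately with min 0 1 = 0, B returns 0
    rw [booth_min_rotation_py, booth_min_rotation_py_alt]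
    simp [h0, boothLoop]
  · obtain ⟨m, hm, hB⟩ := alt_isMinIdx seq hn
    have hInv0 : AInv seq m 0 1 0 := by
      refine ⟨by omega, by omega, by omega, ?_⟩
      intro p hp hpi hpj
      have : p = 0 := by omega
      exact absurd this hpi
    rw [booth_min_rotation_py, loop_spec seq m hm (3 * seq.length + 1) 0 1 0 (by omega) hInv0, hB]
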